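-- pv_equiv track=rewrite | github.com/cerebrotech/django-DefectDojo | domino/base_helpers/base_helper2.py | get_unique_locations_to_upload
-- ===== SOURCE A (Python) =====
-- def get_unique_locations_to_upload(s3_paths_list):
--     unique_locations = []
--     for file in s3_paths_list:
--         # we don't care about actual filename
--         unique_paths_in_file_name = file.split("/")[:-1]
--         l = len(unique_paths_in_file_name) +1
--         for i in range(1,l):
--             path_joined='/'.join(unique_paths_in_file_name[0:i])
--             unique_locations.append(path_joined)
--     return list(set(unique_locations))
-- ===== SOURCE B (Python) =====
-- def get_unique_locations_to_upload(s3_paths_list):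
--     # One character scan per path: every '/' at index j marks the directory
--     # prefix file[:j]; collect them in a set directly (no split/join/slicing loop).
--     unique_locations = set()
--     for file in s3_paths_list:
--         for j, ch in enumerate(file):
--             if ch == "/":
--                 unique_locations.add(file[:j])
--     return list(unique_locations)
-- ===== Notes on version B (the rewrite author's own statement) =====
-- stated objective: alternative
-- what changed: Instead of splitting each path on '/', slicing every front segment list and re-joining it (then deduplicating the collected list through set()), B makes one character scan per path and adds the prefix file[:j] for every '/' at index j directly into a set.
import Mathlib
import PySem

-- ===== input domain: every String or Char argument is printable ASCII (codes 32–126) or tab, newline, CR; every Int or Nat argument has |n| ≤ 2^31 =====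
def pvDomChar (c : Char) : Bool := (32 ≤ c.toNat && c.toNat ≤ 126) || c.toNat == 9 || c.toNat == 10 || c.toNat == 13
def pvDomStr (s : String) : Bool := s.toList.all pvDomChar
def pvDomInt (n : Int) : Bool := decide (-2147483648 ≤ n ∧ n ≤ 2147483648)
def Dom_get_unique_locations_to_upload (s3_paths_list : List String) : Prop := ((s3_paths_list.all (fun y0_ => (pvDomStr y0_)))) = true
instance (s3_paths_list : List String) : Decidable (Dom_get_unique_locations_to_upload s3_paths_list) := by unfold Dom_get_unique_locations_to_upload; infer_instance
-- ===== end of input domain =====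

-- B replaces A's split/slice/join prefix enumeration by one character scan per path:
-- each '/' at index j contributes the prefix file[:j] straight into a set (alternative decomposition, same cost).


-- ===== PORT A =====
def get_unique_locations_to_upload (s3_paths_list : List String) : List String :=
  -- unique_locations = []; for file in s3_paths_list: ... ; return list(set(unique_locations))
  let unique_locations : List String :=
    s3_paths_list.foldl (fun unique_locations file =>
      let unique_paths_in_file_name : List String :=
        PySem.List.slice ((PySem.Str.split? file "/").getD []) none (some (-1))
      let l : Int := (unique_paths_in_file_name.length : Int) + 1
      (PySem.List.pyRange 1 l 1).foldl (fun unique_locations i =>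
        unique_locations ++
          [PySem.Str.join "/" (PySem.List.slice unique_paths_in_file_name (some 0) (some i))])
        unique_locations) []
  PySem.Set.ofList unique_locations

-- ===== PORT B =====
def get_unique_locations_to_upload_alt (s3_paths_list : List String) : List String :=
  -- unique_locations = set(); for file: for j, ch in enumerate(file): if ch == "/": add file[:j]; return list(...)
  s3_paths_list.foldl (fun unique_locations file =>
    (PySem.List.enumerate file.toList 0).foldl (fun unique_locations jc =>
      if jc.2 = '/' then
        PySem.Set.add unique_locations (PySem.Str.slice file none (some jc.1))
      else unique_locations) unique_locations) PySem.Set.empty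


-- ===== PRECONDITION & SPEC =====
def Spec_get_unique_locations_to_upload (s3_paths_list : List String) (out : List String) : Prop := out = get_unique_locations_to_upload_alt s3_paths_list
instance (s3_paths_list : List String) (out : List String) : Decidable (Spec_get_unique_locations_to_upload s3_paths_list out) := by unfold Spec_get_unique_locations_to_upload; infer_instance

-- ===== CLAIM (what is proved, stated in full; the proofs are below) =====
def Claim_equal_get_unique_locations_to_upload : Prop := ∀ (s3_paths_list : List String), Dom_get_unique_locations_to_upload s3_paths_list → Spec_get_unique_locations_to_upload s3_paths_list (get_unique_locations_to_upload s3_paths_list)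

-- ===== LEMMAS AND PROOFS =====


def splitSpec : List Char → List (List Char)
  | [] => [[]]
  | c :: rest =>
      if c = '/' then [] :: splitSpec rest
      else match splitSpec rest with
        | [] => [[c]]
        | p :: ps => (c :: p) :: ps

def headCons (pre : List Char) : List (List Char) → List (List Char)
  | [] => [pre]
  | p :: ps => (pre ++ p) :: ps

lemma splitSpec_ne_nil (cs : List Char) : splitSpec cs ≠ [] := by
  cases cs with
  | nil => simp [splitSpec]
  | cons c rest =>
      simp only [splitSpec]
      split_ifs
      · simp
      · cases h : splitSpec rest <;> simp

lemma go_eq (fuel : Nat) : ∀ (l cur : List Char) (acc : List (List Char)), l.length < fuel →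
    PySem.Chars.splitOn.go ['/'] fuel l cur acc
      = acc.reverse ++ headCons cur.reverse (splitSpec l) := by
  induction fuel with
  | zero => intro l cur acc h; omega
  | succ f ih =>
      intro l cur acc h
      cases l with
      | nil =>
          rw [PySem.Chars.splitOn.go]
          simp [splitSpec, headCons]
          omega
      | cons c rest =>
          rw [PySem.Chars.splitOn.go]
          simp only [List.isPrefixOf, Bool.and_eq_true, beq_iff_eq, List.length_cons] at *
          by_cases hc : c = '/'
          · subst hc
            simp only [and_self, if_true, List.length_nil, Nat.zero_add, List.drop_succ_cons,
              List.drop_zero]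
            rw [ih rest [] (cur.reverse :: acc) (by omega)]
            cases hs : splitSpec rest with
            | nil => exact absurd hs (splitSpec_ne_nil rest)
            | cons p ps => simp [splitSpec, hs, headCons]
          · rw [if_neg (by simp; intro hcc; exact hc hcc.symm)]
            rw [ih rest (c :: cur) acc (by omega)]
            congr 1
            simp only [splitSpec, if_neg hc]
            cases hs : splitSpec rest with
            | nil => exact absurd hs (splitSpec_ne_nil rest)
            | cons p ps => simp [headCons]

lemma splitOn_eq (cs : List Char) : PySem.Chars.splitOn cs ['/'] = splitSpec cs := by
  unfold PySem.Chars.splitOn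
  rw [go_eq (cs.length + 1) cs [] [] (by omega)]
  cases hs : splitSpec cs with
  | nil => exact absurd hs (splitSpec_ne_nil cs)
  | cons p ps => simp [headCons]

def prefJoins (up : List (List Char)) : List (List Char) :=
  (List.range up.length).map (fun k => PySem.Chars.join ['/'] (up.take (k + 1)))

lemma prefJoins_cons (p : List Char) (ups : List (List Char)) :
    prefJoins (p :: ups) = p :: (prefJoins ups).map (fun q => p ++ '/' :: q) := by
  cases ups with
  | nil => simp [prefJoins, PySem.Chars.join_singleton]
  | cons u us =>
      simp only [prefJoins, List.length_cons, List.range_succ_eq_map, List.map_cons,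
        List.map_map]
      congr 1
      simp [PySem.Chars.join_singleton]

def slashPrefixes : List Char → List (List Char)
  | [] => []
  | c :: rest => (if c = '/' then [[]] else []) ++ (slashPrefixes rest).map (c :: ·)

def slashIdx : List Char → List Nat
  | [] => []
  | c :: rest => (if c = '/' then [0] else []) ++ (slashIdx rest).map (· + 1)

lemma core_A (cs : List Char) : prefJoins ((splitSpec cs).dropLast) = slashPrefixes cs := by
  induction cs with
  | nil => simp [splitSpec, prefJoins, slashPrefixes]
  | cons c rest ih =>
      by_cases hc : c = '/'
      · subst hc
        rw [show splitSpec ('/' :: rest) = [] :: splitSpec rest from by simp [splitSpec]]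
        rw [show slashPrefixes ('/' :: rest)
              = [] :: (slashPrefixes rest).map ('/' :: ·) from by simp [slashPrefixes]]
        rw [List.dropLast_cons_of_ne_nil (splitSpec_ne_nil rest), prefJoins_cons, ih]
        simp
      · rw [show slashPrefixes (c :: rest) = (slashPrefixes rest).map (c :: ·) from by
              simp [slashPrefixes, hc]]
        cases hs : splitSpec rest with
        | nil => exact absurd hs (splitSpec_ne_nil rest)
        | cons p ps =>
            rw [show splitSpec (c :: rest) = (c :: p) :: ps from by simp [splitSpec, hc, hs]]
            cases ps with
            | nil =>
                rw [hs] at ih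
                simp only [List.dropLast_singleton] at ih ⊢
                rw [← ih]
                simp [prefJoins]
            | cons q qs =>
                rw [hs] at ih
                rw [List.dropLast_cons_of_ne_nil (by simp)] at ih ⊢
                rw [prefJoins_cons] at ih ⊢
                rw [← ih]
                simp [List.map_map, Function.comp]

lemma slashPrefixes_eq_takes (cs : List Char) :
    slashPrefixes cs = (slashIdx cs).map (fun j => cs.take j) := by
  induction cs with
  | nil => simp [slashPrefixes, slashIdx]
  | cons c rest ih =>
      simp only [slashPrefixes, slashIdx, List.map_append, List.map_map, ih]
      congr 1
      by_cases hc : c = '/' <;> simp [hc]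

lemma enum_filter (cs : List Char) : ∀ (s : Nat),
    ((PySem.List.enumerate cs (s : Int)).filter (fun p => decide (p.2 = '/')))
      = (slashIdx cs).map (fun j => (((s + j : Nat) : Int), '/')) := by
  induction cs with
  | nil => intro s; simp [slashIdx]
  | cons c rest ih =>
      intro s
      rw [PySem.List.enumerate_cons]
      have h1 : ((s : Int) + 1) = ((s + 1 : Nat) : Int) := by push_cast; ring
      by_cases hc : c = '/'
      · subst hc
        rw [List.filter_cons_of_pos (by simp)]
        rw [h1, ih (s + 1)]
        rw [show slashIdx ('/' :: rest) = 0 :: (slashIdx rest).map (· + 1) from by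
              simp [slashIdx]]
        simp only [List.map_cons, List.map_map]
        congr 1
        apply List.map_congr_left
        intro a _
        have h2 : s + 1 + a = s + (a + 1) := by omega
        simp [Function.comp, h2]
      · rw [List.filter_cons_of_neg (by simp [hc])]
        rw [h1, ih (s + 1)]
        rw [show slashIdx (c :: rest) = (slashIdx rest).map (· + 1) from by
              simp [slashIdx, hc]]
        simp only [List.map_map]
        apply List.map_congr_left
        intro j hj
        simp only [Function.comp]
        congr 1
        push_cast; ring

lemma pyRange_map {α : Type} (g : Int → α) (n : Nat) :
    (PySem.List.pyRange 1 ((n : Int) + 1) 1).map g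
      = (List.range n).map (fun k : Nat => g ((k : Int) + 1)) := by
  induction n with
  | zero => rw [show PySem.List.pyRange 1 (((0 : Nat) : Int) + 1) 1 = [] from by decide]; simp
  | succ m ih =>
      have h : ((m + 1 : Nat) : Int) + 1 = (((m : Int) + 1) + 1) := by push_cast; ring
      rw [h, PySem.List.pyRange_one_succ_right (by omega), List.map_append, ih, List.range_succ]
      simp

lemma foldl_ite_add {α β : Type} [BEq β] (f : α → β) (P : α → Prop) [DecidablePred P] :
    ∀ (l : List α) (s : PySem.Set β),
      l.foldl (fun s x => if P x then PySem.Set.add s (f x) else s) s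
        = PySem.Set.update s ((l.filter (fun x => decide (P x))).map f) := by
  intro l
  induction l with
  | nil => intro s; simp [PySem.Set.update]
  | cons x xs ih =>
      intro s
      by_cases h : P x <;> simp [List.foldl, h, ih, PySem.Set.update]

lemma ofList_foldl_append {α β : Type} [BEq β] (E : α → List β) :
    ∀ (xs : List α) (a : List β),
      PySem.Set.ofList (xs.foldl (fun acc f => acc ++ E f) a)
        = xs.foldl (fun s f => PySem.Set.update s (E f)) (PySem.Set.ofList a) := by
  intro xs
  induction xs with
  | nil => intro a; rfl
  | cons x xs ih =>
      intro a
      simp only [List.foldl]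
      rw [ih]
      congr 1
      simp [PySem.Set.ofList_eq_foldl, PySem.Set.update, List.foldl_append]

lemma split_parts (file : String) :
    ∃ parts : List String, PySem.Str.split? file "/" = some parts ∧
      parts.map String.toList = splitSpec file.toList := by
  have h := PySem.Str.split?_map file "/"
  rw [show ("/" : String).toList = ['/'] from rfl] at h
  rw [show PySem.Chars.split? file.toList ['/']
        = some (PySem.Chars.splitOn file.toList ['/']) from by simp [PySem.Chars.split?]] at h
  cases hs : PySem.Str.split? file "/" with
  | none => rw [hs] at h; simp at h
  | some parts =>
      rw [hs] at h
      simp only [Option.map_some, Option.some.injEq] at h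
      exact ⟨parts, rfl, by rw [h, splitOn_eq]⟩

lemma emit_eq (file : String) :
    ((PySem.List.pyRange 1
        (((PySem.List.slice ((PySem.Str.split? file "/").getD []) none (some (-1))).length : Int) + 1) 1).map
      (fun i => PySem.Str.join "/"
        (PySem.List.slice (PySem.List.slice ((PySem.Str.split? file "/").getD []) none (some (-1))) (some 0) (some i))))
    = ((PySem.List.enumerate file.toList 0).filter (fun p => decide (p.2 = '/'))).map
        (fun p => PySem.Str.slice file none (some p.1)) := by
  obtain ⟨parts, hp, hmap⟩ := split_parts file
  rw [hp]
  simp only [Option.getD_some, PySem.List.slice_to_neg_one]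
  -- LHS
  have hL : ((PySem.List.pyRange 1 ((parts.dropLast.length : Int) + 1) 1).map
        (fun i => PySem.Str.join "/" (PySem.List.slice parts.dropLast (some 0) (some i))))
      = (prefJoins ((splitSpec file.toList).dropLast)).map String.ofList := by
    have hlen : parts.dropLast.length = ((splitSpec file.toList).dropLast).length := by
      rw [← hmap, ← List.map_dropLast]; simp
    rw [pyRange_map _ parts.dropLast.length, prefJoins, ← hlen, List.map_map]
    apply List.map_congr_left
    intro k hk
    simp only [Function.comp]
    rw [PySem.List.slice_zero_start]
    rw [show ((k : Int) + 1) = ((k + 1 : Nat) : Int) from by push_cast; ring]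
    rw [PySem.List.slice_to_natCast]
    rw [show PySem.Str.join "/" (parts.dropLast.take (k + 1))
          = String.ofList (PySem.Chars.join ['/'] ((parts.dropLast.take (k + 1)).map String.toList))
        from rfl]
    congr 1
    rw [List.map_take, List.map_dropLast, hmap]
  rw [hL]
  -- RHS
  rw [show ((0 : Int)) = ((0 : Nat) : Int) from rfl, enum_filter file.toList 0, List.map_map]
  rw [core_A, slashPrefixes_eq_takes, List.map_map]
  apply List.map_congr_left
  intro j hj
  simp only [Function.comp, Nat.zero_add]
  rw [show PySem.Str.slice file none (some ((j : Nat) : Int))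
        = String.ofList (PySem.Chars.slice file.toList none (some ((j : Nat) : Int))) from rfl]
  congr 1
  rw [PySem.Chars.slice_eq_listSlice, PySem.List.slice_to_natCast]

-- A's per-file appended prefixes equal B's per-file scanned prefixes; both folds build the same set.
theorem main_eq (xs : List String) :
    get_unique_locations_to_upload xs = get_unique_locations_to_upload_alt xs := by
  unfold get_unique_locations_to_upload get_unique_locations_to_upload_alt
  simp only [PySem.List.foldl_append_singleton_eq_map]
  rw [ofList_foldl_append]
  simp only [foldl_ite_add]
  rw [show PySem.Set.ofList ([] : List String) = PySem.Set.empty from rfl]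
  congr 1
  funext s file
  rw [emit_eq]

-- ===== VERDICT (by name: the statement is the Claim_ definition above) =====
theorem get_unique_locations_to_upload_spec : Claim_equal_get_unique_locations_to_upload := by
  intro xs _
  exact main_eq xs
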